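-- pv_equiv track=rewrite | github.com/plotplotplot/PanelTalk2TikTok | subtitles.py | _min_max_line_len
-- ===== SOURCE A (Python) =====
-- def _line_length(words):
--     total = 0
--     for i, w in enumerate(words):
--         wlen = len(w)
--         total += wlen if i == 0 else wlen + 1
--     return total
--
-- def _min_max_line_len(words):
--     if len(words) <= 1:
--         return _line_length(words)
--     best = None
--     for split in range(1, len(words)):
--         left = _line_length(words[:split])
--         right = _line_length(words[split:])
--         m = max(left, right)
--         if best is None or m < best:
--             best = m
--     return best if best is not None else 0
-- ===== SOURCE B (Python) =====
-- def _min_max_line_len(words):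
--     # Single pass with a running prefix sum of word lengths: O(n) instead of A's O(n^2).
--     lens = [len(w) for w in words]
--     total = sum(lens)
--     n = len(words)
--     best = None
--     left = 0
--     i = 0
--     for wl in lens[:-1]:
--         left += wl
--         m = max(left + i, total - left + n - i - 2)
--         if best is None or m < best:
--             best = m
--         i += 1
--     return best if best is not None else total
-- ===== Notes on version B (the rewrite author's own statement) =====
-- stated objective: faster
-- what changed: Replaces A's rebuilding of both line slices and re-summing their lengths for every split with a single left-to-right pass that maintains a running prefix sum of word lengths, computing each split's two line lengths in O(1).
import Mathlib
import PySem

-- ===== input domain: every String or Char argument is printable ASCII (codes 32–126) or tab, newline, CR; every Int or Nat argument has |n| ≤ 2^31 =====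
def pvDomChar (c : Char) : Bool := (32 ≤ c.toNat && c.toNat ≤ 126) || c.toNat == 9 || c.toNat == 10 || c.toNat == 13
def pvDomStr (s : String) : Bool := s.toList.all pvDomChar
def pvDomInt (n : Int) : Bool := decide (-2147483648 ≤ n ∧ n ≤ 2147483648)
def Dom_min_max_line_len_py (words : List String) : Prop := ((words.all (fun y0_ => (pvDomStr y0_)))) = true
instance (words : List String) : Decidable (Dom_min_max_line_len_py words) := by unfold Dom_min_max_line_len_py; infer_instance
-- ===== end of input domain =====

-- B replaces A's per-split slicing and re-summing by one pass over a running prefix sum (objective: faster).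


-- ===== PORT A =====
-- _line_length: total = 0; for i, w in enumerate(words): total += len(w) if i == 0 else len(w) + 1
def lineLength (words : List String) : Int :=
  (PySem.List.enumerate words 0).foldl
    (fun total iw => total + (if iw.1 = 0 then PySem.Str.len iw.2 else PySem.Str.len iw.2 + 1)) 0

def min_max_line_len_py (words : List String) : Int :=
  if PySem.List.len words ≤ 1 then lineLength words
  else
    let best :=
      (PySem.List.pyRange 1 (PySem.List.len words) 1).foldl
        (fun best split =>
          let left := lineLength (PySem.List.slice words none (some split))
          let right := lineLength (PySem.List.slice words (some split) none)
          let m := max left right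
          match best with
          | none => some m
          | some b => if m < b then some m else some b)
        none
    match best with
    | none => 0
    | some b => b

-- ===== PORT B =====
def min_max_line_len_py_alt (words : List String) : Int :=
  let lens := words.map PySem.Str.len
  let total := lens.sum
  let n := PySem.List.len words
  let st :=
    (PySem.List.slice lens none (some (-1))).foldl
      (fun (st : Option Int × Int × Int) wl =>
        let left := st.2.1 + wl
        let m := max (left + st.2.2) (total - left + n - st.2.2 - 2)
        let best :=
          match st.1 with
          | none => some m
          | some b => if m < b then some m else some b
        (best, left, st.2.2 + 1))
      (none, 0, 0)
  match st.1 with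
  | none => total
  | some b => b

-- ===== PRECONDITION & SPEC =====
def Spec_min_max_line_len_py (words : List String) (out : Int) : Prop := out = min_max_line_len_py_alt words
instance (words : List String) (out : Int) : Decidable (Spec_min_max_line_len_py words out) := by unfold Spec_min_max_line_len_py; infer_instance

-- ===== CLAIM (what is proved, stated in full; the proofs are below) =====
def Claim_equal_min_max_line_len_py : Prop := ∀ (words : List String), Dom_min_max_line_len_py words → Spec_min_max_line_len_py words (min_max_line_len_py words)

-- ===== LEMMAS AND PROOFS =====

/-- Running-minimum update shared (definitionally) by both loop bodies. -/
def upd (b : Option Int) (m : Int) : Option Int :=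
  match b with
  | none => some m
  | some v => if m < v then some m else some v

/-- The candidate maximum A computes for a given split point. -/
def mA (words : List String) (split : Int) : Int :=
  max (lineLength (PySem.List.slice words none (some split)))
      (lineLength (PySem.List.slice words (some split) none))

/-- The list of candidate maxima B's loop examines, by recursion on the remaining
word lengths, carrying the running prefix sum `left` and the index `i`. -/
def mList (l : List Int) (total n left i : Int) : List Int :=
  match l with
  | [] => []
  | wl :: t =>
      max (left + wl + i) (total - (left + wl) + n - i - 2) :: mList t total n (left + wl) (i + 1)

theorem mList_length (l : List Int) (total n left i : Int) :
    (mList l total n left i).length = l.length := by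
  induction l generalizing left i with
  | nil => simp [mList]
  | cons wl t ih => simp [mList, ih]

theorem lineLength_aux (t : List String) : ∀ (s : Int) (acc : Int), 1 ≤ s →
    (PySem.List.enumerate t s).foldl
      (fun total iw => total + (if iw.1 = 0 then PySem.Str.len iw.2 else PySem.Str.len iw.2 + 1)) acc
    = acc + (t.map (fun w => PySem.Str.len w + 1)).sum := by
  induction t with
  | nil => intro s acc _; simp [PySem.List.enumerate_nil]
  | cons w t ih =>
      intro s acc hs
      have hs0 : ¬(s = 0) := by omega
      rw [PySem.List.enumerate_cons]
      simp only [List.foldl_cons, if_neg hs0]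
      rw [ih (s + 1) _ (by omega)]
      simp [add_assoc, add_comm, add_left_comm]

theorem lineLength_eq (w : String) (t : List String) :
    lineLength (w :: t) = ((w :: t).map PySem.Str.len).sum + (t.length : Int) := by
  unfold lineLength
  rw [PySem.List.enumerate_cons]
  simp only [List.foldl_cons, zero_add]
  rw [lineLength_aux t 1 _ (by omega)]
  have hm : List.map PySem.Str.len t = List.map (fun w => ((w.length : Int))) t :=
    List.map_congr_left (fun a _ => PySem.Str.len_eq a)
  simp [PySem.Str.len_eq, hm, add_comm, add_left_comm]

theorem lineLength_ne_nil (ws : List String) (h : ws ≠ []) :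
    lineLength ws = (ws.map PySem.Str.len).sum + (ws.length : Int) - 1 := by
  cases ws with
  | nil => simp at h
  | cons w t =>
      rw [lineLength_eq]
      simp only [List.length_cons]
      push_cast
      ring

/-- B's fold, projected to its first component, is a fold of `upd` over `mList`. -/
theorem foldB (l : List Int) : ∀ (total n : Int) (best : Option Int) (left i : Int),
    (l.foldl
      (fun (st : Option Int × Int × Int) wl =>
        let lft := st.2.1 + wl
        let m := max (lft + st.2.2) (total - lft + n - st.2.2 - 2)
        let b :=
          match st.1 with
          | none => some m
          | some b => if m < b then some m else some b
        (b, lft, st.2.2 + 1))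
      (best, left, i)).1
    = (mList l total n left i).foldl upd best := by
  induction l with
  | nil => intro total n best left i; simp [mList]
  | cons wl t ih =>
      intro total n best left i
      simp only [List.foldl_cons, mList]
      exact ih total n _ _ _

theorem mList_getElem (l : List Int) : ∀ (total n left i : Int) (k : Nat) (hk : k < l.length),
    (mList l total n left i)[k]'(by rw [mList_length]; exact hk) =
    max (left + (l.take (k+1)).sum + i + k)
        (total - (left + (l.take (k+1)).sum) + n - i - k - 2) := by
  induction l with
  | nil => intro total n left i k hk; simp at hk
  | cons wl t ih =>
      intro total n left i k hk
      cases k with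
      | zero => simp [mList]
      | succ k =>
          have hk' : k < t.length := by simpa using hk
          simp only [mList, List.getElem_cons_succ, List.take_succ_cons, List.sum_cons]
          rw [ih total n (left + wl) (i + 1) k hk']
          push_cast
          congr 1
          all_goals ring

theorem foldl_upd_some (l : List Int) : ∀ (v : Int), ∃ w, l.foldl upd (some v) = some w := by
  induction l with
  | nil => intro v; exact ⟨v, rfl⟩
  | cons x t ih =>
      intro v
      simp only [List.foldl_cons, upd]
      split_ifs <;> exact ih _

/-- The two loops examine the same list of candidate maxima. -/
theorem mapA_eq (words : List String) (h2 : 2 ≤ words.length) :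
    (PySem.List.pyRange 1 (words.length : Int) 1).map (mA words)
      = mList ((words.map PySem.Str.len).dropLast)
          ((words.map PySem.Str.len).sum) (words.length : Int) 0 0 := by
  set lens := words.map PySem.Str.len with hlens
  have hlen : lens.length = words.length := by simp [hlens]
  apply List.ext_getElem
  · rw [List.length_map, PySem.List.length_pyRange_one, mList_length,
        List.length_dropLast, hlen]
    omega
  · intro k hk1 hk2
    have hk : k < words.length - 1 := by
      simpa [PySem.List.length_pyRange_one] using hk1
    have hkl : k < lens.dropLast.length := by simp [hlen]; omega
    rw [List.getElem_map, PySem.List.getElem_pyRange_one, mList_getElem _ _ _ _ _ k hkl]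
    have htake : lens.dropLast.take (k+1) = lens.take (k+1) := by
      rw [List.dropLast_eq_take, List.take_take]
      congr 1
      omega
    have hcast : (1 : Int) + (k : Int) = ((k+1 : Nat) : Int) := by push_cast; ring
    have hwne : words ≠ [] := by
      intro h0
      rw [h0] at h2
      simp at h2
    have htk_ne : words.take (k+1) ≠ [] := by
      simp [List.take_eq_nil_iff, hwne]
    have hdr_ne : words.drop (k+1) ≠ [] := by
      intro hnil
      rw [List.drop_eq_nil_iff] at hnil
      omega
    unfold mA
    rw [hcast, PySem.List.slice_to_natCast, PySem.List.slice_from_natCast,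
        lineLength_ne_nil _ htk_ne, lineLength_ne_nil _ hdr_ne]
    have hmt : (words.take (k+1)).map PySem.Str.len = lens.take (k+1) := by
      simp [hlens, List.map_take]
    have hmd : (words.drop (k+1)).map PySem.Str.len = lens.drop (k+1) := by
      simp [hlens, List.map_drop]
    have hsum : (lens.take (k+1)).sum + (lens.drop (k+1)).sum = lens.sum := by
      rw [← List.sum_append, List.take_append_drop]
    have hlt : (words.take (k+1)).length = k + 1 := by simp; omega
    have hld : (words.drop (k+1)).length = words.length - (k+1) := by simp
    rw [hmt, hmd, hlt, hld, htake]
    have hcast2 : ((words.length - (k+1) : Nat) : Int) = (words.length : Int) - (k+1) := by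
      have : k + 1 ≤ words.length := by omega
      push_cast [this]
      ring
    rw [hcast2]
    push_cast
    congr 1 <;> omega

-- ===== VERDICT (by name: the statement is the Claim_ definition above) =====
theorem min_max_line_len_py_spec : Claim_equal_min_max_line_len_py := by
  intro words _
  unfold Spec_min_max_line_len_py min_max_line_len_py min_max_line_len_py_alt
  simp only [PySem.List.len_eq, PySem.List.slice_to_neg_one]
  by_cases h : (words.length : Int) ≤ 1
  · rw [if_pos h]
    match words, h with
    | [], _ => simp [lineLength, PySem.List.enumerate_nil]
    | [w], _ => simp [lineLength, PySem.List.enumerate_cons, PySem.List.enumerate_nil]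
    | w₁ :: w₂ :: t, h => simp at h; omega
  · rw [if_neg h]
    have h2 : 2 ≤ words.length := by omega
    rw [foldB]
    have hfold : (PySem.List.pyRange 1 (words.length : Int) 1).foldl
        (fun best split =>
          let left := lineLength (PySem.List.slice words none (some split))
          let right := lineLength (PySem.List.slice words (some split) none)
          let m := max left right
          match best with
          | none => some m
          | some b => if m < b then some m else some b)
        none
        = ((PySem.List.pyRange 1 (words.length : Int) 1).map (mA words)).foldl upd none := by
      rw [List.foldl_map]
      rfl
    rw [hfold, mapA_eq words h2]
    have hLlen : (mList ((words.map PySem.Str.len).dropLast)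
        ((words.map PySem.Str.len).sum) (words.length : Int) 0 0).length
        = words.length - 1 := by
      rw [mList_length, List.length_dropLast, List.length_map]
    obtain ⟨x, t, hxt⟩ : ∃ x t, mList ((words.map PySem.Str.len).dropLast)
        ((words.map PySem.Str.len).sum) (words.length : Int) 0 0 = x :: t := by
      cases hM : mList ((words.map PySem.Str.len).dropLast)
          ((words.map PySem.Str.len).sum) (words.length : Int) 0 0 with
      | nil => rw [hM] at hLlen; simp at hLlen; omega
      | cons a b => exact ⟨a, b, rfl⟩
    rw [hxt]
    simp only [List.foldl_cons]
    have hu : upd none x = some x := rfl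
    rw [hu]
    obtain ⟨v, hv⟩ := foldl_upd_some t x
    rw [hv]
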